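-- pv_equiv track=rewrite | github.com/olliklee/AoC | AnimationThrowdownInventory/generate_cards.py | to_stars
-- ===== SOURCE A (Python) =====
-- def to_stars(rarity: int, level: int) -> str:
--     max_level = {
--         1: 3,
--         2: 4,
--         3: 5,
--         4: 6,
--         5: 7
--     }.get(rarity, 6)
--
--     stars = ""
--     i = level
--     while i > max_level:
--         i -= max_level
--         stars = "*" + stars
--
--     return f"{i}{stars}"
-- ===== SOURCE B (Python) =====
-- def to_stars(rarity: int, level: int) -> str:
--     max_level = {
--         1: 3,
--         2: 4,
--         3: 5,
--         4: 6,
--         5: 7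
--     }.get(rarity, 6)
--
--     if level <= max_level:
--         return f"{level}"
--     k = (level - 1) // max_level
--     return f"{level - k * max_level}{'*' * k}"
-- ===== Notes on version B (the rewrite author's own statement) =====
-- stated objective: faster
-- what changed: Replaces the repeated-subtraction while-loop that builds the star string one '*' at a time with a closed-form floor division computing the star count and the residual level at once.
import Mathlib
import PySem

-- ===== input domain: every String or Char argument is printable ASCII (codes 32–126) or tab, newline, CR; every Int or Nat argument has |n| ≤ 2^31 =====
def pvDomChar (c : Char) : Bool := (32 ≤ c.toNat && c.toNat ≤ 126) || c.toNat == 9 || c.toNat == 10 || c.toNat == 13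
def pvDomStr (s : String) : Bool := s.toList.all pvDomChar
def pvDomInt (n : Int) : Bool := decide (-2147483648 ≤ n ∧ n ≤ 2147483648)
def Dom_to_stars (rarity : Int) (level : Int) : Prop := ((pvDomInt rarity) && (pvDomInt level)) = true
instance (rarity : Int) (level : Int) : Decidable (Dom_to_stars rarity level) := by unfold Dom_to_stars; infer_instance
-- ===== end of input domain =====

-- ===== PORT A =====
-- B replaces A's repeated-subtraction star loop by a closed-form floor division (objective: faster — star count by floor division instead of repeated subtraction).

-- the while-loop of A: while i > max_level: i -= max_level; stars = "*" + stars
-- (terminates because the port only calls it with m ∈ {3,4,5,6,7}; the m > 0 guard is a totality guard only)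
def to_stars_loop (m : Int) (i : Int) (stars : String) : String :=
  if 0 < m ∧ m < i then
    to_stars_loop m (i - m) ("*" ++ stars)
  else
    PySem.Int.toStr i ++ stars
termination_by (i - m).toNat
decreasing_by omega

def to_stars (rarity : Int) (level : Int) : String :=
  let max_level : Int :=
    PySem.Dict.getD (PySem.Dict.ofList [((1:Int),(3:Int)),(2,4),(3,5),(4,6),(5,7)]) rarity 6
  to_stars_loop max_level level ""

-- ===== PORT B =====
def to_stars_alt (rarity : Int) (level : Int) : String :=
  let max_level : Int :=
    PySem.Dict.getD (PySem.Dict.ofList [((1:Int),(3:Int)),(2,4),(3,5),(4,6),(5,7)]) rarity 6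
  if level ≤ max_level then
    PySem.Int.toStr level
  else
    let k := PySem.Int.floordiv (level - 1) max_level
    PySem.Int.toStr (level - k * max_level) ++ String.ofList (List.replicate k.toNat '*')

-- ===== PRECONDITION & SPEC =====
def Spec_to_stars (rarity : Int) (level : Int) (out : String) : Prop := out = to_stars_alt rarity level
instance (rarity : Int) (level : Int) (out : String) : Decidable (Spec_to_stars rarity level out) := by unfold Spec_to_stars; infer_instance

-- ===== CLAIM (what is proved, stated in full; the proofs are below) =====
def Claim_equal_to_stars : Prop := ∀ (rarity : Int) (level : Int), Dom_to_stars rarity level → Spec_to_stars rarity level (to_stars rarity level)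

-- ===== LEMMAS AND PROOFS =====

-- the dict lookup, spelled out
theorem ml_eq (r : Int) :
    PySem.Dict.getD (PySem.Dict.ofList [((1:Int),(3:Int)),(2,4),(3,5),(4,6),(5,7)]) r 6 =
      if r = 1 then 3 else if r = 2 then 4 else if r = 3 then 5 else if r = 4 then 6
      else if r = 5 then 7 else 6 := by
  simp [PySem.Dict.ofList, PySem.Dict.update, PySem.Dict.getD_insert, PySem.Dict.getD_empty]
  split_ifs <;> omega

theorem ml_pos (r : Int) :
    0 < PySem.Dict.getD (PySem.Dict.ofList [((1:Int),(3:Int)),(2,4),(3,5),(4,6),(5,7)]) r 6 := by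
  rw [ml_eq]; split_ifs <;> omega

-- closed form of A's loop, by strong induction on the (bounded) loop measure
theorem to_stars_loop_eq_aux (m : Int) (hm : 0 < m) :
    ∀ (n : Nat) (i : Int) (s : String), (i - m).toNat = n →
    to_stars_loop m i s =
      if i ≤ m then PySem.Int.toStr i ++ s
      else PySem.Int.toStr (i - PySem.Int.floordiv (i - 1) m * m) ++
           String.ofList (List.replicate (PySem.Int.floordiv (i - 1) m).toNat '*') ++ s := by
  intro n
  induction n using Nat.strong_induction_on with
  | _ n ih =>
    intro i s hn
    rw [to_stars_loop]
    by_cases hmi : m < i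
    · rw [if_pos ⟨hm, hmi⟩,
        ih (i - m - m).toNat (by omega) (i - m) ("*" ++ s) rfl,
        if_neg (show ¬ i ≤ m by omega)]
      by_cases h2 : i - m ≤ m
      · have hk : PySem.Int.floordiv (i - 1) m = 1 := by
          rw [PySem.Int.floordiv_eq_iff_of_pos hm]; constructor <;> nlinarith
        rw [if_pos h2, hk]
        have h1 : String.ofList (List.replicate ((1:Int).toNat) '*') = "*" := rfl
        have h3 : i - 1 * m = i - m := by ring
        rw [h1, h3]
        simp [String.append_assoc]
      · have hk' : 1 ≤ PySem.Int.floordiv (i - m - 1) m := by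
          rw [PySem.Int.le_floordiv_iff_mul_le hm]; omega
        have hk : PySem.Int.floordiv (i - 1) m = PySem.Int.floordiv (i - m - 1) m + 1 := by
          obtain ⟨ha, hb⟩ :=
            (PySem.Int.floordiv_eq_iff_of_pos (a := i - m - 1) hm).mp rfl
          rw [PySem.Int.floordiv_eq_iff_of_pos hm]
          constructor <;> nlinarith
        rw [if_neg h2, hk]
        have harg : i - m - PySem.Int.floordiv (i - m - 1) m * m =
            i - (PySem.Int.floordiv (i - m - 1) m + 1) * m := by ring
        have hrep : (PySem.Int.floordiv (i - m - 1) m + 1).toNat =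
            (PySem.Int.floordiv (i - m - 1) m).toNat + 1 := by omega
        rw [harg, hrep, List.replicate_succ']
        apply String.toList_inj.mp
        simp
    · rw [if_neg (by tauto), if_pos (by omega)]

theorem to_stars_loop_eq (m i : Int) (s : String) (hm : 0 < m) :
    to_stars_loop m i s =
      if i ≤ m then PySem.Int.toStr i ++ s
      else PySem.Int.toStr (i - PySem.Int.floordiv (i - 1) m * m) ++
           String.ofList (List.replicate (PySem.Int.floordiv (i - 1) m).toNat '*') ++ s :=
  to_stars_loop_eq_aux m hm _ i s rfl

-- ===== VERDICT (by name: the statement is the Claim_ definition above) =====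
theorem to_stars_spec : Claim_equal_to_stars := by
  intro rarity level _
  unfold Spec_to_stars to_stars to_stars_alt
  rw [to_stars_loop_eq _ _ _ (ml_pos rarity)]
  by_cases h : level ≤ PySem.Dict.getD (PySem.Dict.ofList [((1:Int),(3:Int)),(2,4),(3,5),(4,6),(5,7)]) rarity 6
  · simp [h]
  · simp [h]
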